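-- pv_equiv track=rewrite | github.com/ZhangDanyang-AMD/Lumen | examples/rl/trl/benchmark/analyze_benchmark.py | _collect_available_metrics
-- ===== SOURCE A (Python) =====
-- _METRIC_GROUPS = [
--     ("Reward & Quality", [
--         ("reward", "Reward (mean)"),
--         ("reward_std", "Reward (std)"),
--         ("loss", "Loss"),
--         ("entropy", "Entropy"),
--         ("win_rate", "Win Rate"),
--     ]),
--     ("Policy Optimization", [
--         ("kl", "KL Divergence"),
--         ("clip_ratio/region_mean", "Clip Ratio (region)"),
--         ("clip_ratio/low_mean", "Clip Ratio (low)"),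
--         ("clip_ratio/high_mean", "Clip Ratio (high)"),
--     ]),
--     ("Training Dynamics", [
--         ("grad_norm", "Grad Norm"),
--         ("learning_rate", "Learning Rate"),
--         ("frac_reward_zero_std", "Frac Reward Zero Std"),
--     ]),
--     ("Completions", [
--         ("completions/mean_length", "Mean Length"),
--         ("completions/min_length", "Min Length"),
--         ("completions/max_length", "Max Length"),
--         ("completions/clipped_ratio", "Clipped Ratio"),
--     ]),
--     ("Performance", [
--         ("step_time_total", "Total Step Time (s)"),
--         ("peak_memory_allocated_gb", "Peak Memory (GB)"),
--     ]),
-- ]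
--
-- def _collect_available_metrics(run_data: dict) -> list[tuple[str, str]]:
--     """Return (key, label) pairs for metrics present in at least one run."""
--     available = []
--     seen = set()
--     for group_name, metrics in _METRIC_GROUPS:
--         for key, label in metrics:
--             if key in seen:
--                 continue
--             for entries in run_data.values():
--                 if any(key in e and e[key] is not None for e in entries):
--                     available.append((key, label))
--                     seen.add(key)
--                     break
--     return available
-- ===== SOURCE B (Python) =====
-- _METRIC_GROUPS = [
--     ("Reward & Quality", [
--         ("reward", "Reward (mean)"),
--         ("reward_std", "Reward (std)"),
--         ("loss", "Loss"),
--         ("entropy", "Entropy"),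
--         ("win_rate", "Win Rate"),
--     ]),
--     ("Policy Optimization", [
--         ("kl", "KL Divergence"),
--         ("clip_ratio/region_mean", "Clip Ratio (region)"),
--         ("clip_ratio/low_mean", "Clip Ratio (low)"),
--         ("clip_ratio/high_mean", "Clip Ratio (high)"),
--     ]),
--     ("Training Dynamics", [
--         ("grad_norm", "Grad Norm"),
--         ("learning_rate", "Learning Rate"),
--         ("frac_reward_zero_std", "Frac Reward Zero Std"),
--     ]),
--     ("Completions", [
--         ("completions/mean_length", "Mean Length"),
--         ("completions/min_length", "Min Length"),
--         ("completions/max_length", "Max Length"),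
--         ("completions/clipped_ratio", "Clipped Ratio"),
--     ]),
--     ("Performance", [
--         ("step_time_total", "Total Step Time (s)"),
--         ("peak_memory_allocated_gb", "Peak Memory (GB)"),
--     ]),
-- ]
--
--
-- def _collect_available_metrics(run_data: dict) -> list[tuple[str, str]]:
--     """Return (key, label) pairs for metrics present in at least one run."""
--     present = {
--         key
--         for entries in run_data.values()
--         for e in entries
--         for key, value in e.items()
--         if value is not None
--     }
--     return [
--         (key, label)
--         for _group_name, metrics in _METRIC_GROUPS
--         for key, label in metrics
--         if key in present
--     ]
-- ===== Notes on version B (the rewrite author's own statement) =====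
-- stated objective: faster
-- what changed: Instead of rescanning every run's entries once per metric (with a 'seen' set and a break), B makes a single pass over all entries building the set of keys that appear with a non-None value, then filters the flat (key,label) list by membership in that set.
import Mathlib
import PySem

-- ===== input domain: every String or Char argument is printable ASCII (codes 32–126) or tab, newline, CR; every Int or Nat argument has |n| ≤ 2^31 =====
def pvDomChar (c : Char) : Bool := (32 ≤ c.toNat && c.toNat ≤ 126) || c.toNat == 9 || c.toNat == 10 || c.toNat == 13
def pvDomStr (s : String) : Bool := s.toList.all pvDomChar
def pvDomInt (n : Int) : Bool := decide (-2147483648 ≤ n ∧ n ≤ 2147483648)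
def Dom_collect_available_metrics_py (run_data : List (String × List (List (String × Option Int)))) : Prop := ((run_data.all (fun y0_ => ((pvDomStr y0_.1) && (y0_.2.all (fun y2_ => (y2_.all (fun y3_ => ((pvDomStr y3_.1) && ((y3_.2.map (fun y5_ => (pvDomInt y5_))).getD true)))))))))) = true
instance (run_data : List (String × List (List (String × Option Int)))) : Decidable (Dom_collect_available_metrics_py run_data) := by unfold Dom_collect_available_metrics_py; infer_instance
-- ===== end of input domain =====

-- B replaces A's per-metric rescan of every run (with a 'seen' set and break) by one pass
-- building the set of keys present with a non-None value, then a membership filter (measured faster).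

-- ===== PORT A =====
-- the module constant _METRIC_GROUPS
def pvMetricGroups : List (String × List (String × String)) :=
  [ ("Reward & Quality",
      [ ("reward", "Reward (mean)"), ("reward_std", "Reward (std)"), ("loss", "Loss"),
        ("entropy", "Entropy"), ("win_rate", "Win Rate") ]),
    ("Policy Optimization",
      [ ("kl", "KL Divergence"), ("clip_ratio/region_mean", "Clip Ratio (region)"),
        ("clip_ratio/low_mean", "Clip Ratio (low)"), ("clip_ratio/high_mean", "Clip Ratio (high)") ]),
    ("Training Dynamics",
      [ ("grad_norm", "Grad Norm"), ("learning_rate", "Learning Rate"),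
        ("frac_reward_zero_std", "Frac Reward Zero Std") ]),
    ("Completions",
      [ ("completions/mean_length", "Mean Length"), ("completions/min_length", "Min Length"),
        ("completions/max_length", "Max Length"), ("completions/clipped_ratio", "Clipped Ratio") ]),
    ("Performance",
      [ ("step_time_total", "Total Step Time (s)"), ("peak_memory_allocated_gb", "Peak Memory (GB)") ]) ]

-- 'key in e and e[key] is not None' (e a dict)
def pvEntryHas (key : String) (e : List (String × Option Int)) : Bool :=
  match (PySem.Dict.ofList e).get? key with
  | some (some _) => true
  | _ => false

-- the inner 'for entries in run_data.values(): if any(...): …; break' performs a constant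
-- action on the first hit, so it is ported as .any over the values (exact)
def collect_available_metrics_py (run_data : List (String × List (List (String × Option Int)))) : List (String × String) :=
  (pvMetricGroups.foldl (fun st g =>
      g.2.foldl (fun st kl =>
        if PySem.Set.contains st.2 kl.1 then st
        else if (PySem.Dict.ofList run_data).values.any (fun entries =>
                  entries.any (fun e => pvEntryHas kl.1 e)) then
          (st.1 ++ [kl], PySem.Set.add st.2 kl.1)
        else st) st)
    (([], PySem.Set.empty) : List (String × String) × PySem.Set String)).1

-- ===== PORT B =====
-- the set comprehension: every key appearing with a non-None value in some entry of some run
def pvPresent (run_data : List (String × List (List (String × Option Int)))) : PySem.Set String :=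
  (PySem.Dict.ofList run_data).values.foldl (fun s entries =>
    entries.foldl (fun s e =>
      (PySem.Dict.ofList e).items.foldl (fun s kv =>
        if kv.2.isSome then PySem.Set.add s kv.1 else s) s) s) PySem.Set.empty

def collect_available_metrics_py_alt (run_data : List (String × List (List (String × Option Int)))) : List (String × String) :=
  let present := pvPresent run_data
  pvMetricGroups.flatMap (fun g => g.2.filter (fun kl => PySem.Set.contains present kl.1))

-- ===== PRECONDITION & SPEC =====
def Spec_collect_available_metrics_py (run_data : List (String × List (List (String × Option Int)))) (out : List (String × String)) : Prop := out = collect_available_metrics_py_alt run_data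
instance (run_data : List (String × List (List (String × Option Int)))) (out : List (String × String)) : Decidable (Spec_collect_available_metrics_py run_data out) := by unfold Spec_collect_available_metrics_py; infer_instance

-- ===== CLAIM (what is proved, stated in full; the proofs are below) =====
def Claim_equal_collect_available_metrics_py : Prop := ∀ (run_data : List (String × List (List (String × Option Int)))), Dom_collect_available_metrics_py run_data → Spec_collect_available_metrics_py run_data (collect_available_metrics_py run_data)

-- ===== LEMMAS AND PROOFS =====

-- A's availability test for one key
def pvAvail (run_data : List (String × List (List (String × Option Int)))) (key : String) : Bool :=
  (PySem.Dict.ofList run_data).values.any (fun entries =>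
    entries.any (fun e => pvEntryHas key e))

-- the 18 (key, label) pairs flattened
def pvFlatMetrics : List (String × String) := pvMetricGroups.flatMap (·.2)

-- membership through a conditional-add fold
theorem pv_mem_foldl_addIf {α β : Type} [BEq α] [LawfulBEq α] (l : List β) (f : β → α) (q : β → Bool)
    (s : PySem.Set α) (y : α) :
    (y ∈ l.foldl (fun s b => if q b then PySem.Set.add s (f b) else s) s)
      ↔ y ∈ s ∨ ∃ b ∈ l, q b ∧ y = f b := by
  induction l generalizing s with
  | nil => simp
  | cons b l ih =>
    simp only [List.foldl_cons, ih]
    by_cases h : q b = true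
    · simp [h, PySem.Set.mem_add]; tauto
    · simp [h]

theorem pv_mem_entry_fold (e : List (String × Option Int)) (s : PySem.Set String) (y : String) :
    (y ∈ (PySem.Dict.ofList e).items.foldl (fun s kv =>
        if kv.2.isSome then PySem.Set.add s kv.1 else s) s)
      ↔ y ∈ s ∨ pvEntryHas y e = true := by
  rw [pv_mem_foldl_addIf]
  constructor
  · rintro (h | ⟨⟨k, w⟩, hmem, hsome, rfl⟩)
    · exact Or.inl h
    · obtain ⟨v, rfl⟩ := Option.isSome_iff_exists.mp hsome
      have hg := PySem.Dict.get?_of_mem_items (PySem.Dict.ofList e) hmem (PySem.Dict.nodup_keys_ofList e)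
      exact Or.inr (by simp [pvEntryHas, hg])
  · rintro (h | h)
    · exact Or.inl h
    · unfold pvEntryHas at h
      rcases hg : (PySem.Dict.ofList e).get? y with _ | w
      · rw [hg] at h; simp at h
      · rcases w with _ | v
        · rw [hg] at h; simp at h
        · exact Or.inr ⟨(y, some v), PySem.Dict.mem_items_of_get?_eq_some _ hg, rfl, rfl⟩

theorem pv_mem_entries_fold (entries : List (List (String × Option Int))) (s : PySem.Set String) (y : String) :
    (y ∈ entries.foldl (fun s e =>
        (PySem.Dict.ofList e).items.foldl (fun s kv =>
          if kv.2.isSome then PySem.Set.add s kv.1 else s) s) s)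
      ↔ y ∈ s ∨ entries.any (fun e => pvEntryHas y e) = true := by
  induction entries generalizing s with
  | nil => simp
  | cons e l ih =>
    simp only [List.foldl_cons, ih, pv_mem_entry_fold, List.any_cons, Bool.or_eq_true]; tauto

theorem pv_mem_values_fold (vs : List (List (List (String × Option Int)))) (s : PySem.Set String) (y : String) :
    (y ∈ vs.foldl (fun s entries =>
        entries.foldl (fun s e =>
          (PySem.Dict.ofList e).items.foldl (fun s kv =>
            if kv.2.isSome then PySem.Set.add s kv.1 else s) s) s) s)
      ↔ y ∈ s ∨ vs.any (fun entries => entries.any (fun e => pvEntryHas y e)) = true := by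
  induction vs generalizing s with
  | nil => simp
  | cons entries l ih =>
    simp only [List.foldl_cons, ih, pv_mem_entries_fold, List.any_cons, Bool.or_eq_true]; tauto

theorem pv_contains_present (run_data : List (String × List (List (String × Option Int)))) (y : String) :
    PySem.Set.contains (pvPresent run_data) y = pvAvail run_data y := by
  rw [Bool.eq_iff_iff, PySem.Set.contains_iff]
  unfold pvPresent pvAvail
  rw [pv_mem_values_fold]
  simp [PySem.Set.empty]

-- A's double fold, on metrics with pairwise-distinct fresh keys, appends the filter
theorem pv_A_fold (p : String → Bool) (ms : List (String × String)) (acc : List (String × String))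
    (seen : PySem.Set String)
    (hfresh : ∀ kl ∈ ms, PySem.Set.contains seen kl.1 = false)
    (hnd : (ms.map Prod.fst).Nodup) :
    (ms.foldl (fun st kl =>
        if PySem.Set.contains st.2 kl.1 then st
        else if p kl.1 then (st.1 ++ [kl], PySem.Set.add st.2 kl.1) else st)
      (acc, seen)).1 = acc ++ ms.filter (fun kl => p kl.1) := by
  induction ms generalizing acc seen with
  | nil => simp
  | cons kl tl ih =>
    have hkl := hfresh kl (by simp)
    simp only [List.map_cons, List.nodup_cons] at hnd
    simp only [List.foldl_cons]
    rw [if_neg (by rw [hkl]; simp)]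
    by_cases hp : p kl.1 = true
    · rw [if_pos hp]
      rw [ih (acc ++ [kl]) _ ?_ hnd.2]
      · simp [hp]
      · intro kl' h'
        have hne : kl'.1 ≠ kl.1 := fun he => hnd.1 (he ▸ List.mem_map_of_mem h')
        have : kl'.1 ∉ (PySem.Set.add seen kl.1 : List String) := by
          rw [PySem.Set.mem_add]
          push Not
          exact ⟨by simpa [PySem.Set.contains_iff] using hfresh kl' (List.mem_cons_of_mem _ h'), hne⟩
        simpa [PySem.Set.contains_iff] using this
    · rw [if_neg hp, ih acc seen (fun kl' h' => hfresh kl' (List.mem_cons_of_mem _ h')) hnd.2]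
      simp [hp]

-- a fold of folds over the groups is the fold over the flattened metric list
theorem pv_foldl_foldl {sigma : Type} (groups : List (String × List (String × String)))
    (f : sigma → (String × String) → sigma) (init : sigma) :
    groups.foldl (fun st g => g.2.foldl f st) init = (groups.flatMap (·.2)).foldl f init := by
  induction groups generalizing init with
  | nil => rfl
  | cons g l ih => simp [List.foldl_append, ih]

theorem pv_A_eq_filter (run_data : List (String × List (List (String × Option Int)))) :
    collect_available_metrics_py run_data = pvFlatMetrics.filter (fun kl => pvAvail run_data kl.1) := by
  unfold collect_available_metrics_py
  rw [pv_foldl_foldl, show pvMetricGroups.flatMap (fun g => g.2) = pvFlatMetrics from rfl]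
  exact pv_A_fold
    (fun key => (PySem.Dict.ofList run_data).values.any (fun entries =>
      entries.any (fun e => pvEntryHas key e)))
    pvFlatMetrics [] PySem.Set.empty (fun kl _ => rfl) (by decide)

-- ===== VERDICT (by name: the statement is the Claim_ definition above) =====
theorem collect_available_metrics_py_spec : Claim_equal_collect_available_metrics_py := by
  intro run_data _
  unfold Spec_collect_available_metrics_py collect_available_metrics_py_alt
  rw [pv_A_eq_filter]
  have : pvFlatMetrics = pvMetricGroups.flatMap (·.2) := rfl
  simp only [pvMetricGroups, List.flatMap_cons, List.flatMap_nil, List.append_nil, this,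
    List.filter_append, pv_contains_present]
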